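-- pv_equiv track=rewrite | github.com/ernestoyaquello/AdventOfCode | 2024/day21.py | calculate_keypad_to_keypad_moves
-- ===== SOURCE A (Python) =====
-- def calculate_keypad_to_keypad_moves(current_position, target_position, keypad, current_path, current_moves = []):
--     if current_position == target_position:
--         return [current_moves + [{'A': (0, 0)}]]
--
--     moves = []
--     for key, (x_offset, y_offset) in {'<': (-1, 0), '^': (0, -1), '>': (1, 0), 'v': (0, 1)}.items():
--         next_position = (current_position[0] + x_offset, current_position[1] + y_offset)
--         if next_position not in current_path and next_position in keypad:
--             moves.extend(calculate_keypad_to_keypad_moves(next_position, target_position, keypad, current_path + [next_position], current_moves + [{key: (x_offset, y_offset)}]))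
--     return moves
-- ===== SOURCE B (Python) =====
-- def calculate_keypad_to_keypad_moves(current_position, target_position, keypad, current_path, current_moves = []):
--     # Iterative DFS with an explicit stack instead of recursion; neighbors are
--     # pushed in reverse order so completed paths come out in the same order.
--     results = []
--     stack = [(current_position, current_path, current_moves)]
--     while stack:
--         position, path, moves = stack.pop()
--         if position == target_position:
--             results.append(moves + [{'A': (0, 0)}])
--         else:
--             for key, (x_offset, y_offset) in (('v', (0, 1)), ('>', (1, 0)), ('^', (0, -1)), ('<', (-1, 0))):
--                 next_position = (position[0] + x_offset, position[1] + y_offset)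
--                 if next_position not in path and next_position in keypad:
--                     stack.append((next_position, path + [next_position], moves + [{key: (x_offset, y_offset)}]))
--     return results
-- ===== Notes on version B (the rewrite author's own statement) =====
-- stated objective: alternative
-- what changed: The recursive DFS with a per-call loop over the four directions is replaced by an iterative DFS over an explicit stack of (position, path, moves) frames, pushing neighbor frames in reverse order so completed paths are emitted in the same order.
import Mathlib
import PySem

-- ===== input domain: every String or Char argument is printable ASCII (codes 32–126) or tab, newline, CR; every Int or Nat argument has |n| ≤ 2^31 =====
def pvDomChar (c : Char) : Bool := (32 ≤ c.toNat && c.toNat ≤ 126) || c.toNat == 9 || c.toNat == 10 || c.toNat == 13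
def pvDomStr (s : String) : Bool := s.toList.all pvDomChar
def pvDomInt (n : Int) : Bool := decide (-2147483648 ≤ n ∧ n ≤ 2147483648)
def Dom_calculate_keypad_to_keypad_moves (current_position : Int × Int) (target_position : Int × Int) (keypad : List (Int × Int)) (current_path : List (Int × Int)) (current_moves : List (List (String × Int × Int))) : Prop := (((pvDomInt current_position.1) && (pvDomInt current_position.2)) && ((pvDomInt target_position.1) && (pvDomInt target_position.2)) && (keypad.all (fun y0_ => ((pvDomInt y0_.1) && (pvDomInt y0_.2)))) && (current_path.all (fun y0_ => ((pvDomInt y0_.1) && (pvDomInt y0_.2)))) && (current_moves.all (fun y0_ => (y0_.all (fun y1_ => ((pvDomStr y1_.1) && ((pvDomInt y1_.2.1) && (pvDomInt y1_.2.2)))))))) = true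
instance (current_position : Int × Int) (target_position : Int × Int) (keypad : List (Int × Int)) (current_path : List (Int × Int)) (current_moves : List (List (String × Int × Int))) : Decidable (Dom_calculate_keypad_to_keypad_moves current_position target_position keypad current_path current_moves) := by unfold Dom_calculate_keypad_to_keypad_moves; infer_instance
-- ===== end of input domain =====

-- B replaces A's recursive DFS by an iterative DFS over an explicit stack of frames
-- (neighbors pushed in reverse order so completed paths come out in the same order); objective: alternative.


-- ===== PORT A =====
-- number of keypad cells not yet on the path: the DFS termination measure
def pvFree (keypad path : List (Int × Int)) : Nat :=
  (keypad.filter (fun p => decide (p ∉ path))).length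

-- termination helper (cited by both ports): adding a fresh keypad cell strictly shrinks pvFree
theorem pvFree_append_lt (keypad path : List (Int × Int)) (np : Int × Int)
    (hk : np ∈ keypad) (hp : np ∉ path) :
    pvFree keypad (path ++ [np]) < pvFree keypad path := by
  unfold pvFree
  have hsub : List.Sublist (keypad.filter (fun p => decide (p ∉ path ++ [np])))
      (keypad.filter (fun p => decide (p ∉ path))) := by
    apply List.monotone_filter_right
    intro x hx
    simp only [decide_eq_true_eq] at hx ⊢
    intro hmem; exact hx (List.mem_append_left _ hmem)
  have hne : keypad.filter (fun p => decide (p ∉ path ++ [np])) ≠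
      keypad.filter (fun p => decide (p ∉ path)) := by
    intro he
    have h1 : np ∈ keypad.filter (fun p => decide (p ∉ path)) :=
      List.mem_filter.2 ⟨hk, by simpa using hp⟩
    rw [← he] at h1
    have h2 := (List.mem_filter.1 h1).2
    simp at h2
  exact Nat.lt_of_le_of_ne hsub.length_le (fun h => hne (hsub.eq_of_length h))

mutual
-- literal port of A: recursive DFS threading the current_moves accumulator
def calculate_keypad_to_keypad_moves (current_position : Int × Int) (target_position : Int × Int) (keypad : List (Int × Int)) (current_path : List (Int × Int)) (current_moves : List (List (String × Int × Int))) : List (List (List (String × Int × Int))) :=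
  if current_position = target_position then
    [current_moves ++ [[("A", ((0 : Int), (0 : Int)))]]]
  else
    pvCalcLoop [("<", ((-1 : Int), (0 : Int))), ("^", (0, -1)), (">", (1, 0)), ("v", (0, 1))]
      current_position target_position keypad current_path current_moves
termination_by 5 * pvFree keypad current_path + 5
decreasing_by
  simp only [List.length_cons, List.length_nil]
  omega

-- A's for-loop over the direction dict, as structural recursion; moves.extend = append
def pvCalcLoop (ds : List (String × Int × Int)) (cp tp : Int × Int) (keypad path : List (Int × Int)) (moves : List (List (String × Int × Int))) : List (List (List (String × Int × Int))) :=
  match ds with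
  | [] => []
  | (key, off) :: rest =>
    (if _h : (cp.1 + off.1, cp.2 + off.2) ∉ path ∧ (cp.1 + off.1, cp.2 + off.2) ∈ keypad then
        calculate_keypad_to_keypad_moves (cp.1 + off.1, cp.2 + off.2) tp keypad
          (path ++ [(cp.1 + off.1, cp.2 + off.2)]) (moves ++ [[(key, off)]])
      else []) ++ pvCalcLoop rest cp tp keypad path moves
termination_by 5 * pvFree keypad path + ds.length
decreasing_by
  · have hlt := pvFree_append_lt keypad path _ _h.2 _h.1
    simp only [List.length_cons]
    omega
  · simp only [List.length_cons]
    omega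
end

-- ===== PORT B =====
-- push one direction's frame onto the stack if the neighbor is fresh and on the keypad
def pvPush (keypad : List (Int × Int)) (pos : Int × Int) (path : List (Int × Int)) (moves : List (List (String × Int × Int)))
    (st : List ((Int × Int) × List (Int × Int) × List (List (String × Int × Int)))) (kd : String × Int × Int) :
    List ((Int × Int) × List (Int × Int) × List (List (String × Int × Int))) :=
  if (pos.1 + kd.2.1, pos.2 + kd.2.2) ∉ path ∧ (pos.1 + kd.2.1, pos.2 + kd.2.2) ∈ keypad then
    ((pos.1 + kd.2.1, pos.2 + kd.2.2), path ++ [(pos.1 + kd.2.1, pos.2 + kd.2.2)], moves ++ [[kd]]) :: st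
  else st

-- termination helper (cited by pvAltLoop): pushing neighbors adds at most ds.length frames,
-- each of weight ≤ 5^(pvFree path)/5, so five times the new measure stays bounded
theorem pvM_foldl_push (keypad : List (Int × Int)) (pos : Int × Int) (path : List (Int × Int)) (moves : List (List (String × Int × Int))) :
    ∀ (ds : List (String × Int × Int)) (rest : List ((Int × Int) × List (Int × Int) × List (List (String × Int × Int)))),
      5 * ((ds.foldl (pvPush keypad pos path moves) rest).map (fun fr => 5 ^ pvFree keypad fr.2.1)).sum ≤
        ds.length * 5 ^ pvFree keypad path + 5 * (rest.map (fun fr => 5 ^ pvFree keypad fr.2.1)).sum := by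
  intro ds
  induction ds with
  | nil => intro rest; simp
  | cons kd ds ih =>
    intro rest
    have hstep : 5 * (((pvPush keypad pos path moves rest kd).map (fun fr => 5 ^ pvFree keypad fr.2.1)).sum) ≤
        5 ^ pvFree keypad path + 5 * ((rest.map (fun fr => 5 ^ pvFree keypad fr.2.1)).sum) := by
      unfold pvPush
      split_ifs with hc
      · have hlt := pvFree_append_lt keypad path _ hc.2 hc.1
        have hw : 5 ^ (pvFree keypad (path ++ [(pos.1 + kd.2.1, pos.2 + kd.2.2)]) + 1) ≤ 5 ^ pvFree keypad path :=
          Nat.pow_le_pow_right (by omega) (by omega)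
        rw [pow_succ] at hw
        simp only [List.map_cons, List.sum_cons]
        omega
      · have hX : 0 < 5 ^ pvFree keypad path := pow_pos (by norm_num) _
        omega
    have hih := ih (pvPush keypad pos path moves rest kd)
    have hX : 0 < 5 ^ pvFree keypad path := pow_pos (by norm_num) _
    have hmul : (ds.length + 1) * 5 ^ pvFree keypad path =
        ds.length * 5 ^ pvFree keypad path + 5 ^ pvFree keypad path := by ring
    simp only [List.foldl_cons, List.length_cons]
    omega

-- B's while-loop: pop a frame (list head = stack top), record a result at the target
-- or push the four neighbor frames in reverse order
def pvAltLoop (tp : Int × Int) (keypad : List (Int × Int))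
    (stack : List ((Int × Int) × List (Int × Int) × List (List (String × Int × Int))))
    (results : List (List (List (String × Int × Int)))) : List (List (List (String × Int × Int))) :=
  match stack with
  | [] => results
  | (pos, path, moves) :: rest =>
    if pos = tp then
      pvAltLoop tp keypad rest (results ++ [moves ++ [[("A", ((0 : Int), (0 : Int)))]]])
    else
      pvAltLoop tp keypad
        ([("v", ((0 : Int), (1 : Int))), (">", (1, 0)), ("^", (0, -1)), ("<", (-1, 0))].foldl
          (pvPush keypad pos path moves) rest)
        results
termination_by (stack.map (fun fr => 5 ^ pvFree keypad fr.2.1)).sum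
decreasing_by
  · have hpos : 0 < 5 ^ pvFree keypad path := pow_pos (by norm_num) _
    simp only [List.map_cons, List.sum_cons]
    omega
  · have h4 := pvM_foldl_push keypad pos path moves
      [("v", ((0 : Int), (1 : Int))), (">", (1, 0)), ("^", (0, -1)), ("<", (-1, 0))] rest
    have hpos : 0 < 5 ^ pvFree keypad path := pow_pos (by norm_num) _
    simp only [List.length_cons, List.length_nil, List.map_cons, List.sum_cons] at h4 ⊢
    omega

def calculate_keypad_to_keypad_moves_alt (current_position : Int × Int) (target_position : Int × Int) (keypad : List (Int × Int)) (current_path : List (Int × Int)) (current_moves : List (List (String × Int × Int))) : List (List (List (String × Int × Int))) :=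
  pvAltLoop target_position keypad [(current_position, current_path, current_moves)] []

-- ===== PRECONDITION & SPEC =====
def Spec_calculate_keypad_to_keypad_moves (current_position : Int × Int) (target_position : Int × Int) (keypad : List (Int × Int)) (current_path : List (Int × Int)) (current_moves : List (List (String × Int × Int))) (out : List (List (List (String × Int × Int)))) : Prop := out = calculate_keypad_to_keypad_moves_alt current_position target_position keypad current_path current_moves
instance (current_position : Int × Int) (target_position : Int × Int) (keypad : List (Int × Int)) (current_path : List (Int × Int)) (current_moves : List (List (String × Int × Int))) (out : List (List (List (String × Int × Int)))) : Decidable (Spec_calculate_keypad_to_keypad_moves current_position target_position keypad current_path current_moves out) := by unfold Spec_calculate_keypad_to_keypad_moves; infer_instance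

-- ===== CLAIM (what is proved, stated in full; the proofs are below) =====
def Claim_equal_calculate_keypad_to_keypad_moves : Prop := ∀ (current_position : Int × Int) (target_position : Int × Int) (keypad : List (Int × Int)) (current_path : List (Int × Int)) (current_moves : List (List (String × Int × Int))), Dom_calculate_keypad_to_keypad_moves current_position target_position keypad current_path current_moves → Spec_calculate_keypad_to_keypad_moves current_position target_position keypad current_path current_moves (calculate_keypad_to_keypad_moves current_position target_position keypad current_path current_moves)

-- ===== LEMMAS AND PROOFS =====
-- flattening a conditional push = a conditional block in front
theorem pvFlatten_push {α β : Type} (g : α → List β) (c : Prop) [Decidable c] (fr : α) (st : List α) :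
    (List.map g (if c then fr :: st else st)).flatten =
      (if c then g fr else []) ++ (List.map g st).flatten := by
  split_ifs <;> simp

-- loop invariant: the stack loop appends, in order, A's result for every frame on the stack
theorem pvAltLoop_eq (tp : Int × Int) (keypad : List (Int × Int)) :
    ∀ stack results, pvAltLoop tp keypad stack results =
      results ++ (stack.map (fun fr => calculate_keypad_to_keypad_moves fr.1 tp keypad fr.2.1 fr.2.2)).flatten := by
  intro stack results
  fun_induction pvAltLoop tp keypad stack results with
  | case1 results => simp
  | case2 results path moves rest ih =>
    rw [ih]
    simp [calculate_keypad_to_keypad_moves]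
  | case3 results pos path moves rest hne ih =>
    rw [ih, List.map_cons, List.flatten_cons,
      calculate_keypad_to_keypad_moves, if_neg hne]
    simp only [pvCalcLoop, pvPush, List.foldl_cons, List.foldl_nil, dite_eq_ite,
      pvFlatten_push, List.append_assoc, List.append_nil]


-- ===== VERDICT (by name: the statement is the Claim_ definition above) =====
theorem calculate_keypad_to_keypad_moves_spec : Claim_equal_calculate_keypad_to_keypad_moves := by
  intro cp tp kp path mv _
  unfold Spec_calculate_keypad_to_keypad_moves calculate_keypad_to_keypad_moves_alt
  rw [pvAltLoop_eq]
  simp
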